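-- pv_equiv track=rewrite | github.com/sudais-ai/ai-video-summarizer | ai-video-summarizer/Ai-VideoSummarizer/ai-video-summarizer/backend/services/summary_generator.py | _rank_sentences
-- ===== SOURCE A (Python) =====
-- from typing import List, Dict
--
-- def _rank_sentences(sentences: List[str]) -> List[str]:
--     keywords = ['important', 'key', 'main', 'learn', 'understand', 'concept',
--                'explain', 'demonstrate', 'topic', 'video', 'title', 'content']
--
--     scored = []
--     for i, sentence in enumerate(sentences):
--         score = sum(2 for kw in keywords if kw in sentence.lower())
--         if i < 3:
--             score += 3
--         if 10 <= len(sentence.split()) <= 40: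
--             score += 2
--         scored.append((score, sentence))
--
--     scored.sort(key=lambda x: x[0], reverse=True)
--     return [s[1] for s in scored]
-- ===== SOURCE B (Python) =====
-- from typing import List
--
-- KEYWORDS = ['important', 'key', 'main', 'learn', 'understand', 'concept',
--             'explain', 'demonstrate', 'topic', 'video', 'title', 'content']
--
-- MAX_SCORE = 29  # 12 keywords * 2 + 3 + 2
--
-- def _rank_sentences(sentences: List[str]) -> List[str]:
--     # Bucket (counting) sort over the bounded integer score instead of a comparison sort.
--     buckets = {}
--     for i, sentence in enumerate(sentences):
--         low = sentence.lower()
--         score = 2 * sum(kw in low for kw in KEYWORDS)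
--         if i < 3:
--             score += 3
--         if 10 <= len(sentence.split()) <= 40:
--             score += 2
--         buckets.setdefault(score, []).append(sentence)
--     out = []
--     for score in range(MAX_SCORE, -1, -1):
--         out.extend(buckets.get(score, []))
--     return out
-- ===== Notes on version B (the rewrite author's own statement) =====
-- stated objective: alternative
-- what changed: B replaces building a scored list and calling Python's comparison sort with a bucket (counting) sort: sentences are appended in input order to a dict keyed by their bounded score (0..29) and emitted by iterating scores from 29 down to 0, which preserves the stable tie order.
import Mathlib
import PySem

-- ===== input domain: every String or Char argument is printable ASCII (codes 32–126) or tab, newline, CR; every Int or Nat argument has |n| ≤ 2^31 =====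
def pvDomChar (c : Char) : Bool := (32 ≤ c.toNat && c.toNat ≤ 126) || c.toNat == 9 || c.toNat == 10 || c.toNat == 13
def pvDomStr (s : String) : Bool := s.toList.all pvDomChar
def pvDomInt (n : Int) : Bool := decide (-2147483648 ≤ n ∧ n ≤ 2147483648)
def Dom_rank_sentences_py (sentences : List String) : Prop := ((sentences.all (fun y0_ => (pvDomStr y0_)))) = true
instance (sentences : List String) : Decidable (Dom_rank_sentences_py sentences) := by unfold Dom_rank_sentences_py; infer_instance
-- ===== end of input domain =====

-- B replaces Python's comparison sort by a bucket (counting) sort over the bounded score 0..29;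
-- same per-sentence scoring, ties keep input order by construction.

def pvKeywords : List String :=
  ["important", "key", "main", "learn", "understand", "concept",
   "explain", "demonstrate", "topic", "video", "title", "content"]

-- ===== PORT A =====
-- score of a sentence at position i, exactly A's three steps
def pvScoreA (i : Int) (s : String) : Int :=
  let score := ((pvKeywords.filter (fun kw => PySem.Str.isIn kw (PySem.Str.lower s))).map
      (fun _ => (2 : Int))).sum
  let score := if i < 3 then score + 3 else score
  if 10 ≤ (PySem.Str.split₀ s).length ∧ (PySem.Str.split₀ s).length ≤ 40 then score + 2 else score

def rank_sentences_py (sentences : List String) : List String :=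
  let scored := (PySem.List.enumerate sentences).foldl
    (fun acc p => acc ++ [(pvScoreA p.1 p.2, p.2)]) []
  (PySem.List.sorted scored (fun x => x.1) true).map (fun s => s.2)

-- ===== PORT B =====
-- score of a sentence at position i, B's formulation (2 * sum of booleans)
def pvScoreB (i : Int) (s : String) : Int :=
  let low := PySem.Str.lower s
  let score := 2 * (pvKeywords.map (fun kw => if PySem.Str.isIn kw low then (1 : Int) else 0)).sum
  let score := if i < 3 then score + 3 else score
  if 10 ≤ (PySem.Str.split₀ s).length ∧ (PySem.Str.split₀ s).length ≤ 40 then score + 2 else score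

def rank_sentences_py_alt (sentences : List String) : List String :=
  let buckets := (PySem.List.enumerate sentences).foldl
    (fun d p => d.modify (pvScoreB p.1 p.2) [] (fun l => l ++ [p.2])) (PySem.Dict.empty)
  (PySem.List.pyRange 29 (-1) (-1)).foldl (fun acc sc => acc ++ buckets.getD sc []) []

-- ===== PRECONDITION & SPEC =====
def Spec_rank_sentences_py (sentences : List String) (out : List String) : Prop := out = rank_sentences_py_alt sentences
instance (sentences : List String) (out : List String) : Decidable (Spec_rank_sentences_py sentences out) := by unfold Spec_rank_sentences_py; infer_instance

-- ===== CLAIM (what is proved, stated in full; the proofs are below) =====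
def Claim_equal_rank_sentences_py : Prop := ∀ (sentences : List String), Dom_rank_sentences_py sentences → Spec_rank_sentences_py sentences (rank_sentences_py sentences)

-- ===== LEMMAS AND PROOFS =====

theorem pv_indicator_sum {α : Type} (p : α → Bool) (l : List α) :
    (l.map (fun x => if p x then (1 : Int) else 0)).sum = ((l.filter p).length : Int) := by
  induction l with
  | nil => simp
  | cons a t ih =>
    by_cases hA : p a = true <;> simp [hA, ih] <;> omega

theorem pv_sum_two_filter {α : Type} (p : α → Bool) (l : List α) :
    ((l.filter p).map (fun _ => (2 : Int))).sum
      = 2 * (l.map (fun x => if p x then (1 : Int) else 0)).sum := by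
  rw [pv_indicator_sum]
  simp [mul_comm]

theorem pv_sum_indicator_bounds {α : Type} (p : α → Bool) (l : List α) :
    0 ≤ (l.map (fun x => if p x then (1 : Int) else 0)).sum ∧
      (l.map (fun x => if p x then (1 : Int) else 0)).sum ≤ l.length := by
  rw [pv_indicator_sum]
  have := List.length_filter_le p l
  omega

theorem pvScoreA_eq_pvScoreB (i : Int) (s : String) : pvScoreA i s = pvScoreB i s := by
  unfold pvScoreA pvScoreB
  rw [pv_sum_two_filter]

theorem pvScoreB_bounds (i : Int) (s : String) : 0 ≤ pvScoreB i s ∧ pvScoreB i s ≤ 29 := by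
  unfold pvScoreB
  have h1 := pv_sum_indicator_bounds (fun kw => PySem.Str.isIn kw (PySem.Str.lower s)) pvKeywords
  have hlen : (pvKeywords.length : Int) = 12 := by decide
  rw [hlen] at h1
  dsimp only
  split_ifs <;> omega

-- insertBy walks past a block in which nothing triggers `before`
theorem pv_insertBy_append {α : Type} (before : α → α → Bool) (x : α) (l rest : List α)
    (h : ∀ y ∈ l, before x y = false) :
    PySem.List.insertBy before x (l ++ rest) = l ++ PySem.List.insertBy before x rest := by
  induction l with
  | nil => simp
  | cons a t ih =>
    have ha : before x a = false := h a (by simp)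
    simp only [List.cons_append, PySem.List.insertBy, ha]
    simp [ih (fun y hy => h y (by simp [hy]))]

-- inserting x into the bucketed form appends it at the end of its own bucket
theorem pv_insertBy_buckets {α : Type} (key : α → Int) (x : α) :
    ∀ (S : List Int), S.Pairwise (· > ·) → key x ∈ S → ∀ (xs : List α),
    PySem.List.insertBy (fun a b => decide (key b < key a)) x
        (S.flatMap (fun sc => xs.filter (fun p => key p == sc)))
      = S.flatMap (fun sc => (xs ++ [x]).filter (fun p => key p == sc)) := by
  intro S
  induction S with
  | nil => intro _ hmem; simp at hmem
  | cons sc S' ih =>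
    intro hpw hmem xs
    have hpw' : S'.Pairwise (· > ·) := hpw.tail
    have hlt : ∀ b ∈ S', sc > b := fun b hb => List.rel_of_pairwise_cons hpw hb
    by_cases hx : key x = sc
    · -- x belongs to the head bucket
      have hblock : ∀ y ∈ xs.filter (fun p => key p == sc),
          (fun a b => decide (key b < key a)) x y = false := by
        intro y hy
        have := (List.mem_filter.mp hy).2
        have : key y = sc := by simpa using this
        simp [this, hx]
      have hrest : PySem.List.insertBy (fun a b => decide (key b < key a)) x
          (S'.flatMap (fun sc => xs.filter (fun p => key p == sc)))
          = x :: S'.flatMap (fun sc => xs.filter (fun p => key p == sc)) := by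
        cases hE : S'.flatMap (fun sc => xs.filter (fun p => key p == sc)) with
        | nil => simp [PySem.List.insertBy]
        | cons y t =>
          have hy : y ∈ S'.flatMap (fun sc => xs.filter (fun p => key p == sc)) := by
            rw [hE]; simp
          obtain ⟨sc', hsc', hyf⟩ := List.mem_flatMap.mp hy
          have hkey : key y = sc' := by simpa using (List.mem_filter.mp hyf).2
          have : key y < key x := by
            have := hlt sc' hsc'; omega
          simp [PySem.List.insertBy, this]
      rw [List.flatMap_cons, List.flatMap_cons,
        pv_insertBy_append _ _ _ _ hblock, hrest]
      have htail : S'.flatMap (fun sc => (xs ++ [x]).filter (fun p => key p == sc))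
          = S'.flatMap (fun sc => xs.filter (fun p => key p == sc)) := by
        apply List.flatMap_congr  -- may not exist; fallback below
        intro sc' hsc'
        have hne : key x ≠ sc' := by have := hlt sc' hsc'; omega
        simp [List.filter_append, hne]
      rw [htail]
      simp [List.filter_append, hx]
    · -- x belongs to a later bucket
      have hmem' : key x ∈ S' := by
        rcases List.mem_cons.mp hmem with h | h
        · exact absurd h hx
        · exact h
      have hblock : ∀ y ∈ xs.filter (fun p => key p == sc),
          (fun a b => decide (key b < key a)) x y = false := by
        intro y hy
        have hkey : key y = sc := by simpa using (List.mem_filter.mp hy).2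
        have : key x < sc := by have := hlt _ hmem'; omega
        simp [hkey]; omega
      rw [List.flatMap_cons, List.flatMap_cons,
        pv_insertBy_append _ _ _ _ hblock, ih hpw' hmem' xs]
      have : (xs ++ [x]).filter (fun p => key p == sc) = xs.filter (fun p => key p == sc) := by
        simp [List.filter_append, hx]
      rw [this]

-- a stable reverse sort by an Int key is bucket concatenation over any strictly decreasing
-- score list S covering all keys
theorem pv_sorted_rev_eq_buckets {α : Type} (key : α → Int) (S : List Int)
    (hpw : S.Pairwise (· > ·)) :
    ∀ (xs : List α), (∀ p ∈ xs, key p ∈ S) →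
    PySem.List.sorted xs key true = S.flatMap (fun sc => xs.filter (fun p => key p == sc)) := by
  intro xs
  induction xs using List.reverseRecOn with
  | nil => intro _; simp [PySem.List.sorted_rev_eq_foldl_insertBy]
  | append_singleton xs x ih =>
    intro hk
    have hk' : ∀ p ∈ xs, key p ∈ S := fun p hp => hk p (by simp [hp])
    have hx : key x ∈ S := hk x (by simp)
    rw [PySem.List.sorted_rev_eq_foldl_insertBy, List.foldl_append, List.foldl_cons, List.foldl_nil,
      ← PySem.List.sorted_rev_eq_foldl_insertBy, ih hk']
    exact pv_insertBy_buckets key x S hpw hx xs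

-- ===== VERDICT (by name: the statement is the Claim_ definition above) =====
-- the strictly decreasing score list 29, 28, …, 0 that B iterates
theorem pv_range_desc_pairwise :
    (PySem.List.pyRange 29 (-1) (-1)).Pairwise (· > ·) := by
  rw [PySem.List.pyRange_neg_one]
  rw [List.pairwise_map]
  exact List.pairwise_lt_range.imp (by intro a b h; omega)

theorem pv_score_mem_range (c : Int) (h0 : 0 ≤ c) (h29 : c ≤ 29) :
    c ∈ PySem.List.pyRange 29 (-1) (-1) := by
  rw [PySem.List.pyRange_neg_one]
  refine List.mem_map.mpr ⟨(29 - c).toNat, List.mem_range.mpr (by omega), by omega⟩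

theorem rank_sentences_py_spec : Claim_equal_rank_sentences_py := by
  intro sentences _
  unfold Spec_rank_sentences_py rank_sentences_py rank_sentences_py_alt
  dsimp only
  -- name the common scored list
  rw [PySem.List.foldl_append_singleton_eq_map (f := fun p : Int × String => (pvScoreA p.1 p.2, p.2))]
  rw [List.nil_append]
  simp only [pvScoreA_eq_pvScoreB]
  set scored : List (Int × String) :=
    (PySem.List.enumerate sentences).map (fun p => (pvScoreB p.1 p.2, p.2)) with hscored
  -- B's bucket dict is a fold over the same scored list
  have hb : (PySem.List.enumerate sentences).foldl
      (fun d p => d.modify (pvScoreB p.1 p.2) [] (fun l => l ++ [p.2])) (PySem.Dict.empty)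
      = scored.foldl (fun d q => d.modify q.1 [] (fun l => l ++ [q.2])) (PySem.Dict.empty) := by
    rw [hscored, List.foldl_map]
  rw [hb]
  rw [PySem.List.foldl_append_eq_flatMap, List.nil_append]
  have hget : ∀ sc : Int,
      (scored.foldl (fun d q => d.modify q.1 [] (fun l => l ++ [q.2]))
        (PySem.Dict.empty)).getD sc []
      = (scored.filter (fun p => p.1 == sc)).map (fun x => x.2) := by
    intro sc
    rw [PySem.Dict.getD_foldl_modify_append]
    simp [PySem.Dict.empty, PySem.Dict.getD, PySem.Dict.get?]
  have hflat : (PySem.List.pyRange 29 (-1) (-1)).flatMap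
      (fun sc => (scored.foldl (fun d q => d.modify q.1 [] (fun l => l ++ [q.2]))
        (PySem.Dict.empty)).getD sc [])
      = ((PySem.List.pyRange 29 (-1) (-1)).flatMap
          (fun sc => scored.filter (fun p => p.1 == sc))).map (fun x => x.2) := by
    rw [List.map_flatMap]
    exact List.flatMap_congr (fun sc _ => hget sc)
  rw [hflat]
  -- the sorted scored list is exactly the bucket concatenation
  have hcover : ∀ p ∈ scored, p.1 ∈ PySem.List.pyRange 29 (-1) (-1) := by
    intro p hp
    rw [hscored] at hp
    obtain ⟨q, _, rfl⟩ := List.mem_map.mp hp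
    exact pv_score_mem_range _ (pvScoreB_bounds q.1 q.2).1 (pvScoreB_bounds q.1 q.2).2
  rw [pv_sorted_rev_eq_buckets (fun x => x.1) _ pv_range_desc_pairwise scored hcover]
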